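-- pv_equiv track=rewrite | github.com/luxysiv/Cloudflare-Gateway-Pihole | src/utils.py | get_least_specific_subdomains
-- ===== SOURCE A (Python) =====
-- from collections import defaultdict
--
-- def get_least_specific_subdomains(domains: list[str]):
--     # Create a dictionary where the keys are the base domains and the values are lists of subdomains
--     domain_dict = defaultdict(list)
--     for domain in domains:
--         # Split the domain into its constituent parts
--         split_domain = domain.split(".")
--         # The base domain is the last two parts of the domain (e.g., 'example.com')
--         base_domain = ".".join(split_domain[-2:])
--         # Add the domain to the dictionary
--         domain_dict[base_domain].append(split_domain)
--     least_specific_domains = []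
--     # For each base domain, find the least specific subdomain(s)
--     for base_domain, subdomains in domain_dict.items():
--         # Sort the subdomains by length (number of parts)
--         sorted_subdomains = sorted(subdomains, key=len)
--         # Get the length of the shortest subdomain
--         min_length = len(sorted_subdomains[0])
--         # Filter out the subdomains that are not the least specific
--         least_specific_subdomains = [
--             ".".join(subdomain)
--             for subdomain in sorted_subdomains
--             if len(subdomain) == min_length
--         ]
--         # Add the least specific subdomains to the result list
--         least_specific_domains.extend(least_specific_subdomains)
--     return least_specific_domains
-- ===== SOURCE B (Python) =====
-- def get_least_specific_subdomains(domains: list[str]):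
--     # Single streaming pass: per base domain keep (min part count, current survivors);
--     # a shorter entry resets its group, an equally short one joins it.  No sort, no
--     # second filtering pass over the groups.
--     best = {}
--     for domain in domains:
--         parts = domain.split(".")
--         base = ".".join(parts[-2:])
--         prev = best.get(base)
--         if prev is None or len(parts) < prev[0]:
--             best[base] = (len(parts), [domain])
--         elif len(parts) == prev[0]:
--             prev[1].append(domain)
--     out = []
--     for _, survivors in best.values():
--         out.extend(survivors)
--     return out
-- ===== Notes on version B (the rewrite author's own statement) =====
-- stated objective: faster
-- what changed: Replaces A's group-then-sort-then-filter (grouping dict of split lists, per-group sort by length, head min, filter, re-join) with a single streaming pass that keeps per base domain only (min part count, current survivors), resetting the group when a shorter domain arrives; no sort and no second pass over groups.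
import Mathlib
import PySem

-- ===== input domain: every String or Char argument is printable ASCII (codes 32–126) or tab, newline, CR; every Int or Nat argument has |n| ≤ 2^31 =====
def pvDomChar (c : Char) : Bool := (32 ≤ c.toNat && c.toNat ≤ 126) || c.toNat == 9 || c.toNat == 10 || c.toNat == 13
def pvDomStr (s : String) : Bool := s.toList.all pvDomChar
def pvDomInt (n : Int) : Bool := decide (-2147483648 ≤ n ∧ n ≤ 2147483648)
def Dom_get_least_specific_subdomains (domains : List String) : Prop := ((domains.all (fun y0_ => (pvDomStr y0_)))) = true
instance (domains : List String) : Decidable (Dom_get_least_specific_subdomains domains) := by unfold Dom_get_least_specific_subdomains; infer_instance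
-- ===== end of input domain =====

-- B replaces A's group/sort/filter pipeline with one streaming pass that keeps,
-- per base domain, only the minimal part count and the current survivors
-- (a shorter domain resets its group, an equally short one joins it): no sort,
-- no second filtering pass over the groups.

-- ===== PORT A =====
def get_least_specific_subdomains (domains : List String) : List String :=
  let domain_dict : PySem.Dict String (List (List String)) :=
    domains.foldl (fun d domain =>
      -- split_domain = domain.split("."): the separator "." is nonempty, so split? is always some
      let split_domain : List String := (PySem.Str.split? domain ".").getD []
      let base_domain : String := PySem.Str.join "." (PySem.List.slice split_domain (some (-2)) none)
      -- defaultdict(list): domain_dict[base_domain].append(split_domain)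
      d.modify base_domain [] (· ++ [split_domain])) PySem.Dict.empty
  domain_dict.items.foldl (fun least_specific_domains p =>
      let sorted_subdomains := PySem.List.sorted p.2 (fun l => l.length)
      -- sorted_subdomains[0]: every group is nonempty by construction, so pyGet? is always some
      let min_length : Nat := ((PySem.List.pyGet? sorted_subdomains 0).getD []).length
      least_specific_domains ++
        (sorted_subdomains.filter (fun s => s.length == min_length)).map
          (fun subdomain => PySem.Str.join "." subdomain)) []

-- ===== PORT B =====
def get_least_specific_subdomains_alt (domains : List String) : List String :=
  let best : PySem.Dict String (Nat × List String) :=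
    domains.foldl (fun best domain =>
      -- parts = domain.split("."): the separator "." is nonempty, so split? is always some
      let parts : List String := (PySem.Str.split? domain ".").getD []
      let base : String := PySem.Str.join "." (PySem.List.slice parts (some (-2)) none)
      -- prev = best.get(base); mutations of prev[1] act on the stored value
      match best.get? base with
      | none => best.insert base (parts.length, [domain])
      | some prev =>
          if parts.length < prev.1 then best.insert base (parts.length, [domain])
          else if parts.length == prev.1 then best.insert base (prev.1, prev.2 ++ [domain])
          else best) PySem.Dict.empty
  best.values.foldl (fun out pr => out ++ pr.2) []

-- ===== PRECONDITION & SPEC =====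
def Spec_get_least_specific_subdomains (domains : List String) (out : List String) : Prop := out = get_least_specific_subdomains_alt domains
instance (domains : List String) (out : List String) : Decidable (Spec_get_least_specific_subdomains domains out) := by unfold Spec_get_least_specific_subdomains; infer_instance

-- ===== CLAIM (what is proved, stated in full; the proofs are below) =====
def Claim_equal_get_least_specific_subdomains : Prop := ∀ (domains : List String), Dom_get_least_specific_subdomains domains → Spec_get_least_specific_subdomains domains (get_least_specific_subdomains domains)

-- ===== LEMMAS AND PROOFS =====

-- the split list, the base-domain key and the part count both ports compute
def pvSplit (x : String) : List String := (PySem.Str.split? x ".").getD []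
def pvKey (x : String) : String :=
  PySem.Str.join "." (PySem.List.slice (pvSplit x) (some (-2)) none)
def pvLen (x : String) : Nat := (pvSplit x).length
-- the members of a base-domain group, in original order
def pvF (domains : List String) (k : String) : List String :=
  domains.filter (fun x => pvKey x == k)
-- A's grouping dictionary and per-group output body
def pvDictA (domains : List String) : PySem.Dict String (List (List String)) :=
  domains.foldl (fun d x => d.modify (pvKey x) [] (· ++ [pvSplit x])) PySem.Dict.empty
def pvGA (p : String × List (List String)) : List String :=
  ((PySem.List.sorted p.2 (fun l => l.length)).filter
      (fun s => s.length ==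
        ((PySem.List.pyGet? (PySem.List.sorted p.2 (fun l => l.length)) 0).getD []).length)).map
    (fun subdomain => PySem.Str.join "." subdomain)
-- B's streaming step, as a dictionary step and as the induced per-key action
def pvStepB (best : PySem.Dict String (Nat × List String)) (domain : String) :
    PySem.Dict String (Nat × List String) :=
  let parts : List String := (PySem.Str.split? domain ".").getD []
  let base : String := PySem.Str.join "." (PySem.List.slice parts (some (-2)) none)
  match best.get? base with
  | none => best.insert base (parts.length, [domain])
  | some prev =>
      if parts.length < prev.1 then best.insert base (parts.length, [domain])
      else if parts.length == prev.1 then best.insert base (prev.1, prev.2 ++ [domain])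
      else best
def pvOStep (o : Option (Nat × List String)) (x : String) : Option (Nat × List String) :=
  match o with
  | none => some (pvLen x, [x])
  | some prev =>
      if pvLen x < prev.1 then some (pvLen x, [x])
      else if pvLen x == prev.1 then some (prev.1, prev.2 ++ [x])
      else some prev
def pvDictB (domains : List String) : PySem.Dict String (Nat × List String) :=
  domains.foldl pvStepB PySem.Dict.empty

-- ".".join(s.split(".")) == s : the splitOn.go invariant on the Chars level
lemma pv_inter_cons2 (sep w1 w2 : List Char) (zs : List (List Char)) :
    sep.intercalate (w1 :: w2 :: zs) = w1 ++ sep ++ sep.intercalate (w2 :: zs) := by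
  simp [List.intercalate]

lemma pv_inter2 (sep a b : List Char) : ∀ (xs : List (List Char)),
    sep.intercalate (xs ++ [a, b]) = sep.intercalate (xs ++ [a ++ sep ++ b]) := by
  intro xs
  induction xs with
  | nil => simp [List.intercalate]
  | cons x xs ih =>
      cases xs with
      | nil => simp [List.intercalate]
      | cons y ys =>
          simp only [List.cons_append] at ih ⊢
          rw [pv_inter_cons2, pv_inter_cons2 sep x y (ys ++ [a ++ sep ++ b]), ih]

lemma pv_go_inter (sep : List Char) : ∀ (fuel : Nat) (l cur : List Char) (acc : List (List Char)),
    sep.intercalate (PySem.Chars.splitOn.go sep fuel l cur acc) =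
      sep.intercalate (acc.reverse ++ [cur.reverse ++ l])
  | 0, l, cur, acc => by simp [PySem.Chars.splitOn.go]
  | (n+1), [], cur, acc => by simp [PySem.Chars.splitOn.go]
  | (n+1), (c :: rest), cur, acc => by
      rw [PySem.Chars.splitOn.go]
      by_cases h : sep.isPrefixOf (c :: rest)
      · simp only [h, if_true]
        rw [pv_go_inter sep n]
        obtain ⟨t, ht⟩ := List.isPrefixOf_iff_prefix.mp h
        have hd : (c :: rest).drop sep.length = t := by
          rw [← ht, List.drop_left]
        rw [hd, ← ht]
        simp only [List.reverse_cons, List.reverse_nil, List.nil_append, List.append_assoc]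
        rw [show acc.reverse ++ ([cur.reverse] ++ [t]) = acc.reverse ++ [cur.reverse, t] from rfl,
            pv_inter2]
        simp [List.append_assoc]
      · simp only [h, if_false, Bool.false_eq_true]
        rw [pv_go_inter sep n]
        simp

lemma pv_join_split (s : String) : PySem.Str.join "." (pvSplit s) = s := by
  have h1 : pvSplit s = (PySem.Chars.splitOn s.toList ['.']).map String.ofList := by
    simp [pvSplit, PySem.Str.split?, PySem.Chars.split?]
  rw [h1, PySem.Str.join]
  simp only [List.map_map]
  have hco : (String.toList ∘ String.ofList) = id := by funext cs; simp
  rw [hco, List.map_id, PySem.Chars.join, PySem.Chars.splitOn]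
  have h3 : ("." : String).toList = ['.'] := by decide
  rw [h3, pv_go_inter]
  simp [List.intercalate]

-- filtering ONE key class out of the stable insertion sort keeps the original order
lemma pv_filter_insertBy {α : Type} (key : α → Nat) (m : Nat) (x : α) :
    ∀ (ys : List α), List.Pairwise (fun a b => key a ≤ key b) ys →
    (PySem.List.insertBy (fun a b => decide (key a < key b)) x ys).filter (fun a => key a == m) =
      ys.filter (fun a => key a == m) ++ (if key x == m then [x] else []) := by
  intro ys
  induction ys with
  | nil =>
      intro _
      by_cases hxm : key x = m <;> simp [PySem.List.insertBy, hxm]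
  | cons y ys ih =>
      intro hp
      obtain ⟨h1, h2⟩ := List.pairwise_cons.mp hp
      rw [PySem.List.insertBy]
      by_cases hxy : key x < key y
      · simp only [hxy, decide_true, if_true]
        by_cases hxm : key x = m
        · have hnil : (y :: ys).filter (fun a => key a == m) = [] := by
            rw [List.filter_eq_nil_iff]
            intro z hz
            rcases List.mem_cons.mp hz with rfl | hz'
            · simp; omega
            · have := h1 z hz'; simp; omega
          simp [hnil, hxm]
        · simp [List.filter_cons, hxm]
      · simp only [hxy, decide_false, if_false, Bool.false_eq_true]
        rw [List.filter_cons, List.filter_cons, ih h2]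
        split <;> simp

lemma pv_filter_sorted {α : Type} (key : α → Nat) (m : Nat) (xs : List α) :
    (PySem.List.sorted xs key).filter (fun a => key a == m) = xs.filter (fun a => key a == m) := by
  induction xs using List.reverseRecOn with
  | nil => rfl
  | append_singleton xs x ih =>
      have hstep : PySem.List.sorted (xs ++ [x]) key =
          PySem.List.insertBy (fun a b => decide (key a < key b)) x (PySem.List.sorted xs key) := by
        rw [PySem.List.sorted_eq_foldl_insertBy, PySem.List.sorted_eq_foldl_insertBy,
            List.foldl_append]
        rfl
      rw [hstep, pv_filter_insertBy key m x _ (PySem.List.sorted_pairwise xs key), ih,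
          List.filter_append]
      congr 1
      by_cases hxm : key x = m <;> simp [hxm]

-- the head length of the length-sorted group equals the minimum of the lengths
lemma pv_min_length (G : List (List String)) (hne : G ≠ []) :
    ((PySem.List.pyGet? (PySem.List.sorted G (fun l => l.length)) 0).getD []).length =
      (PySem.List.min? (G.map (fun l => l.length)) (fun n => n)).getD 0 := by
  obtain ⟨h, t, hS⟩ : ∃ h t, PySem.List.sorted G (fun l => l.length) = h :: t := by
    cases hS : PySem.List.sorted G (fun l => l.length) with
    | nil => exact absurd (Iff.mp (PySem.List.sorted_eq_nil_iff ..) hS) hne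
    | cons h t => exact ⟨h, t, rfl⟩
  have hGne : G.map (fun l => l.length) ≠ [] := by simpa using hne
  obtain ⟨mv, hmv⟩ : ∃ mv, PySem.List.min? (G.map (fun l => l.length)) (fun n => n) = some mv := by
    cases hm : PySem.List.min? (G.map (fun l => l.length)) (fun n => n) with
    | none => exact absurd (Iff.mp (PySem.List.min?_eq_none_iff ..) hm) hGne
    | some mv => exact ⟨mv, rfl⟩
  have hhead : h ∈ G := Iff.mp (PySem.List.mem_sorted ..) (hS ▸ List.mem_cons_self ..)
  obtain ⟨g, hg, hglen⟩ := List.mem_map.mp (PySem.List.min?_mem hmv)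
  have hle1 : h.length ≤ mv := hglen ▸ PySem.List.key_head_sorted_le G (fun l => l.length) hS g hg
  have hle2 : mv ≤ h.length := PySem.List.min?_isMin hmv h.length (List.mem_map.mpr ⟨h, hhead, rfl⟩)
  rw [hS, hmv]
  simp [PySem.List.pyGet?, PySem.List.pyIdx?]
  omega

-- A's grouping dictionary: keys, nodup, per-key contents
lemma pv_nodupA (domains : List String) : (pvDictA domains).keys.Nodup :=
  PySem.Dict.nodup_keys_foldl_modify_key domains pvKey []
    (fun _ x v => v ++ [pvSplit x]) PySem.Dict.empty (PySem.Dict.nodup_keys_empty)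

lemma pv_keysA (domains : List String) :
    (pvDictA domains).keys = PySem.Set.ofList (domains.map pvKey) := by
  unfold pvDictA
  rw [PySem.Dict.keys_foldl_modify_key domains pvKey [] (fun _ x v => v ++ [pvSplit x])
      PySem.Dict.empty]
  simp [PySem.Dict.keys_empty, PySem.Set.update_nil_left]

lemma pv_getA (domains : List String) (k : String) :
    (pvDictA domains).getD k [] = (pvF domains k).map pvSplit := by
  have hfm := (List.foldl_map (f := fun x => (pvKey x, pvSplit x))
    (g := fun (d : PySem.Dict String (List (List String))) p => d.modify p.1 [] (fun v => v ++ [p.2]))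
    (l := domains) (init := PySem.Dict.empty))
  rw [show pvDictA domains = (domains.map (fun x => (pvKey x, pvSplit x))).foldl
      (fun d p => d.modify p.1 [] (fun v => v ++ [p.2])) PySem.Dict.empty from hfm.symm]
  rw [PySem.Dict.getD_foldl_modify_append]
  rw [List.filter_map, List.map_map]
  simp [pvF, Function.comp_def]

-- B's streaming step only touches the key pvKey x
lemma pv_step_get? (d : PySem.Dict String (Nat × List String)) (x k : String) :
    (pvStepB d x).get? k = if pvKey x = k then pvOStep (d.get? k) x else d.get? k := by
  show (match d.get? (pvKey x) with
        | none => d.insert (pvKey x) (pvLen x, [x])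
        | some prev =>
            if pvLen x < prev.1 then d.insert (pvKey x) (pvLen x, [x])
            else if pvLen x == prev.1 then d.insert (pvKey x) (prev.1, prev.2 ++ [x])
            else d).get? k = _
  by_cases hk : pvKey x = k
  · subst hk
    cases hg : d.get? (pvKey x) with
    | none => simp [pvOStep, PySem.Dict.get?_insert_self]
    | some prev =>
        by_cases h1 : pvLen x < prev.1
        · simp [pvOStep, h1, PySem.Dict.get?_insert_self]
        · by_cases h2 : pvLen x = prev.1
          · simp [pvOStep, h2, PySem.Dict.get?_insert_self]
          · simp [pvOStep, hg, h1, h2]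
  · cases hg : d.get? (pvKey x) with
    | none => simp [hk, PySem.Dict.get?_insert_of_ne d _ (fun h => hk h.symm)]
    | some prev =>
        by_cases h1 : pvLen x < prev.1
        · simp [hk, h1, PySem.Dict.get?_insert_of_ne d _ (fun h => hk h.symm)]
        · by_cases h2 : pvLen x = prev.1
          · simp [hk, h2, PySem.Dict.get?_insert_of_ne d _ (fun h => hk h.symm)]
          · simp [hk, h1, h2]

lemma pv_get?_foldB (domains : List String) :
    ∀ (d : PySem.Dict String (Nat × List String)) (k : String),
    (domains.foldl pvStepB d).get? k =
      (domains.filter (fun x => pvKey x == k)).foldl pvOStep (d.get? k) := by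
  induction domains with
  | nil => intro d k; rfl
  | cons x rest ih =>
      intro d k
      rw [List.foldl_cons, ih, List.filter_cons]
      by_cases hk : pvKey x = k
      · simp [hk, pv_step_get?]
      · simp [hk, pv_step_get?]

lemma pv_keysB_fold (domains : List String) :
    ∀ (d : PySem.Dict String (Nat × List String)),
    (domains.foldl pvStepB d).keys = PySem.Set.update d.keys (domains.map pvKey) := by
  induction domains with
  | nil => intro d; simp [PySem.Set.update]
  | cons x rest ih =>
      intro d
      rw [List.foldl_cons, ih, List.map_cons, PySem.Set.update_cons]
      congr 1
      show (match d.get? (pvKey x) with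
            | none => d.insert (pvKey x) (pvLen x, [x])
            | some prev =>
                if pvLen x < prev.1 then d.insert (pvKey x) (pvLen x, [x])
                else if pvLen x == prev.1 then d.insert (pvKey x) (prev.1, prev.2 ++ [x])
                else d).keys = _
      cases hg : d.get? (pvKey x) with
      | none =>
          have hc : d.contains (pvKey x) = false := by
            rw [← PySem.Dict.get?_eq_none_iff_contains]; exact hg
          have hm : pvKey x ∉ d.keys := fun hmem => by
            have := (PySem.Dict.contains_iff_mem_keys d (pvKey x)).mpr hmem
            simp [hc] at this
          rw [PySem.Dict.keys_insert_of_not_contains d _ hc, PySem.Set.add]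
          simp [hm]
      | some prev =>
          have hc : d.contains (pvKey x) = true := by
            have := PySem.Dict.get?_eq_none_iff_contains (d := d) (k := pvKey x)
            cases hcc : d.contains (pvKey x)
            · rw [this.mpr hcc] at hg; cases hg
            · rfl
          have hm : pvKey x ∈ d.keys := (PySem.Dict.contains_iff_mem_keys d (pvKey x)).mp hc
          have hadd : PySem.Set.add d.keys (pvKey x) = d.keys := by
            rw [PySem.Set.add]; simp [hm]
          by_cases h1 : pvLen x < prev.1
          · simp [h1, PySem.Dict.keys_insert_of_contains d _ hc, hadd]
          · by_cases h2 : pvLen x = prev.1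
            · simp [h2, PySem.Dict.keys_insert_of_contains d _ hc, hadd]
            · simp [h1, h2, hadd]

lemma pv_keysB (domains : List String) :
    (pvDictB domains).keys = PySem.Set.ofList (domains.map pvKey) := by
  rw [pvDictB, pv_keysB_fold]
  simp [PySem.Dict.keys_empty, PySem.Set.update_nil_left]

lemma pv_nodupB (domains : List String) : (pvDictB domains).keys.Nodup := by
  rw [pv_keysB]; exact PySem.Set.nodup_ofList _

-- the per-key streaming state is (minimal length, members of minimal length in order)
lemma pv_ostep_char (L : List String) (hne : L ≠ []) :
    ∃ m, L.foldl pvOStep none = some (m, L.filter (fun x => pvLen x == m)) ∧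
      (∀ y ∈ L, m ≤ pvLen y) ∧ (∃ y ∈ L, pvLen y = m) := by
  induction L using List.reverseRecOn with
  | nil => exact absurd rfl hne
  | append_singleton L x ih =>
      rw [List.foldl_append]
      by_cases hL : L = []
      · subst hL
        refine ⟨pvLen x, ?_, ?_, ⟨x, by simp⟩⟩
        · simp [pvOStep]
        · intro y hy; simp at hy; subst hy; exact le_refl _
      · obtain ⟨m, hfold, hbd, y0, hy0, hy0m⟩ := ih hL
        rw [hfold]
        rcases lt_trichotomy (pvLen x) m with h1 | h2 | h3
        · refine ⟨pvLen x, ?_, ?_, ⟨x, by simp⟩⟩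
          · have hnil : L.filter (fun y => pvLen y == pvLen x) = [] := by
              rw [List.filter_eq_nil_iff]
              intro z hz
              have := hbd z hz
              simp; omega
            simp [pvOStep, h1, List.filter_append, hnil]
          · intro y hy
            rcases List.mem_append.mp hy with hy' | hy'
            · have := hbd y hy'; omega
            · simp at hy'; subst hy'; exact le_refl _
        · refine ⟨m, ?_, ?_, ⟨y0, by simp [hy0], hy0m⟩⟩
          · simp [pvOStep, h2, List.filter_append]
          · intro y hy
            rcases List.mem_append.mp hy with hy' | hy'
            · exact hbd y hy'
            · simp at hy'; subst hy'; omega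
        · refine ⟨m, ?_, ?_, ⟨y0, by simp [hy0], hy0m⟩⟩
          · have hlt : ¬ pvLen x < m := by omega
            have hne' : ¬ pvLen x = m := by omega
            simp [pvOStep, hlt, hne', List.filter_append]
          · intro y hy
            rcases List.mem_append.mp hy with hy' | hy'
            · exact hbd y hy'
            · simp at hy'; subst hy'; omega

-- the streaming minimum is THE minimum of the group lengths
lemma pv_min_eq (L : List String) (m : Nat)
    (hbd : ∀ y ∈ L, m ≤ pvLen y) (hat : ∃ y ∈ L, pvLen y = m) :
    (PySem.List.min? (L.map pvLen) (fun n => n)).getD 0 = m := by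
  obtain ⟨y0, hy0, hy0m⟩ := hat
  have hLne : L.map pvLen ≠ [] := by
    intro h; rw [List.map_eq_nil_iff] at h; subst h; cases hy0
  obtain ⟨mv, hmv⟩ : ∃ mv, PySem.List.min? (L.map pvLen) (fun n => n) = some mv := by
    cases hm : PySem.List.min? (L.map pvLen) (fun n => n) with
    | none => exact absurd (Iff.mp (PySem.List.min?_eq_none_iff ..) hm) hLne
    | some mv => exact ⟨mv, rfl⟩
  obtain ⟨g, hg, hglen⟩ := List.mem_map.mp (PySem.List.min?_mem hmv)
  have h1 : m ≤ mv := hglen ▸ hbd g hg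
  have h2 : mv ≤ m := hy0m ▸ PySem.List.min?_isMin hmv (pvLen y0) (List.mem_map.mpr ⟨y0, hy0, rfl⟩)
  rw [hmv]
  simp; omega

-- A's per-group body produces exactly the members of minimal part count, in order
lemma pv_GA_filter (L : List String) (hne : L ≠ [])
    (m : Nat) (hbd : ∀ y ∈ L, m ≤ pvLen y) (hat : ∃ y ∈ L, pvLen y = m) (k : String) :
    pvGA (k, L.map pvSplit) = L.filter (fun x => pvLen x == m) := by
  have hGne : L.map pvSplit ≠ [] := by simpa using hne
  unfold pvGA
  dsimp only
  rw [pv_min_length (L.map pvSplit) hGne]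
  have hmm : (L.map pvSplit).map (fun l => l.length) = L.map pvLen := by
    simp [List.map_map, Function.comp_def, pvLen]
  rw [hmm, pv_min_eq L m hbd hat, pv_filter_sorted]
  rw [List.filter_map, List.map_map]
  have : ∀ x ∈ L.filter ((fun s => s.length == m) ∘ pvSplit),
      ((fun subdomain => PySem.Str.join "." subdomain) ∘ pvSplit) x = x := by
    intro x _; simp [pv_join_split]
  rw [List.map_congr_left this, List.map_id']
  rfl

-- ===== VERDICT (by name: the statement is the Claim_ definition above) =====
theorem get_least_specific_subdomains_spec : Claim_equal_get_least_specific_subdomains := by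
  intro domains _
  show get_least_specific_subdomains domains = get_least_specific_subdomains_alt domains
  have hA : get_least_specific_subdomains domains =
      (pvDictA domains).items.foldl (fun acc p => acc ++ pvGA p) [] := rfl
  have hB : get_least_specific_subdomains_alt domains =
      (pvDictB domains).values.foldl (fun out pr => out ++ pr.2) [] := rfl
  rw [hA, hB, PySem.List.foldl_append_eq_flatMap, PySem.List.foldl_append_eq_flatMap]
  have hitemsA : (pvDictA domains).items =
      (PySem.Set.ofList (domains.map pvKey)).map (fun k => (k, (pvF domains k).map pvSplit)) := by
    rw [PySem.Dict.items_eq_map_keys _ (pv_nodupA domains) [], pv_keysA]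
    exact List.map_congr_left (fun k _ => by rw [pv_getA])
  have hvalsB : (pvDictB domains).values =
      (PySem.Set.ofList (domains.map pvKey)).map (fun k => (pvDictB domains).getD k (0, [])) := by
    rw [PySem.Dict.values_eq_map_keys _ (pv_nodupB domains) (0, []), pv_keysB]
  rw [hitemsA, hvalsB, List.flatMap_map, List.flatMap_map]
  apply List.flatMap_congr
  intro k hk
  have hmem : k ∈ domains.map pvKey := Iff.mp (PySem.Set.mem_ofList ..) hk
  have hLne : pvF domains k ≠ [] := by
    obtain ⟨x, hx, hkx⟩ := List.mem_map.mp hmem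
    exact List.ne_nil_of_mem (List.mem_filter.mpr ⟨hx, by simp [hkx]⟩)
  obtain ⟨m, hfold, hbd, hat⟩ := pv_ostep_char (pvF domains k) hLne
  have hget : (pvDictB domains).get? k =
      some (m, (pvF domains k).filter (fun x => pvLen x == m)) := by
    rw [pvDictB, pv_get?_foldB, PySem.Dict.get?_empty]
    exact hfold
  have hgetD : (pvDictB domains).getD k (0, []) =
      (m, (pvF domains k).filter (fun x => pvLen x == m)) := by
    rw [PySem.Dict.getD_eq_get?_getD, hget]; rfl
  rw [hgetD]
  exact pv_GA_filter (pvF domains k) hLne m hbd hat k
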